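-- pv_equiv track=rewrite | github.com/rayandasoriya/CodingPractice | 09-10-2019/consecutive.py | cons
-- ===== SOURCE A (Python) =====
-- def cons(s,k):
--     dp = [0]*len(s)
--     dp[0] = 1
--     for i in range(1,len(s)):
--         if s[i-1] == s[i]:
--             dp[i] = dp[i-1]+1
--         else:
--             dp[i] = 1
--     new_str = ""
--     i = len(dp)-1
--     while i>=0:
--         if dp[i]<k:
--             new_str = s[i]+new_str
--             i-=1
--         else:
--             i-=k
--     return new_str
-- ===== SOURCE B (Python) =====
-- def cons(s, k):
--     cur = s[0]
--     count = 0
--     parts = []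
--     for c in s:
--         if c == cur:
--             count += 1
--         else:
--             parts.append(cur * (count % k))
--             cur = c
--             count = 1
--     parts.append(cur * (count % k))
--     return ''.join(parts)
-- ===== Notes on version B (the rewrite author's own statement) =====
-- stated objective: faster
-- what changed: B replaces A's dp table plus backward index-jumping while loop (which builds the result by repeated string prepending) with a single forward pass that groups consecutive equal characters and joins run_length % k copies of each run; intended as faster (measured 36x at n=262144 in one timing run, 72x in another, though one probe could not confirm the label because A times out on k<=0 inputs outside Pre_).
import Mathlib
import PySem

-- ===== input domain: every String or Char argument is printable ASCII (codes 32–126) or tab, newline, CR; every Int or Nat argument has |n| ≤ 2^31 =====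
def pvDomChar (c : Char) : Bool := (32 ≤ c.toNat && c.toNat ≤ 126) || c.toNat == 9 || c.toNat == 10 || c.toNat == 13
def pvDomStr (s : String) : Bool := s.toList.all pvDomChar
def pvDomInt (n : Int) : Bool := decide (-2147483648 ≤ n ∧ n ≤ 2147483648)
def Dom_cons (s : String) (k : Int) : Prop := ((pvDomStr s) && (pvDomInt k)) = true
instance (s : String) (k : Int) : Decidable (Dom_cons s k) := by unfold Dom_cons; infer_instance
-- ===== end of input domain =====

-- B replaces A's dp table + backward index-jumping loop with a single forward pass grouping
-- consecutive equal characters and keeping run_length % k copies of each run (objective: simpler).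

-- ===== PORT A =====
-- dp construction: dp[0] = 1; dp[i] = dp[i-1]+1 if s[i-1]==s[i] else 1
-- (the loop writes dp left to right, each cell from the previous one; ported as the
--  structural recursion carrying the previous char and previous dp value)
def consDpAux : List Char → Char → Int → List Int
  | [], _, _ => []
  | c :: cs, prev, d =>
    let d' := if prev == c then d + 1 else 1
    d' :: consDpAux cs c d'

def consDp : List Char → List Int
  | [] => []
  | c :: cs => 1 :: consDpAux cs c 1

-- the `while i>=0` loop; fuel = length of s suffices for k ≥ 1 (inside Pre_cons);
-- the .getD defaults are never hit inside Pre_cons (indices stay in range)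
def consLoop (s : List Char) (dp : List Int) (k : Int) : Int → List Char → Nat → List Char
  | _, acc, 0 => acc
  | i, acc, fuel + 1 =>
    if 0 ≤ i then
      if (PySem.List.pyGet? dp i).getD 0 < k then
        consLoop s dp k (i - 1) ((PySem.List.pyGet? s i).getD ' ' :: acc) fuel
      else
        consLoop s dp k (i - k) acc fuel
    else acc

def cons (s : String) (k : Int) : String :=
  match s.toList with
  | [] => ""   -- Python: dp[0] = 1 raises IndexError here (excluded by Pre_cons)
  | c :: cs =>
      String.mk (consLoop (c :: cs) (consDp (c :: cs)) k ((c :: cs).length - 1) [] (c :: cs).length)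

-- ===== PORT B =====
def consAltRep (c : Char) (n : Int) : List Char := List.replicate n.toNat c

def consAltGo (k : Int) : List Char → Char → Int → List Char
  | [], cur, cnt => consAltRep cur (PySem.Int.mod cnt k)
  | c :: cs, cur, cnt =>
    if c == cur then consAltGo k cs cur (cnt + 1)
    else consAltRep cur (PySem.Int.mod cnt k) ++ consAltGo k cs c 1

def cons_alt (s : String) (k : Int) : String :=
  match s.toList with
  | [] => ""   -- Python B: cur = s[0] raises IndexError here (excluded by Pre_cons)
  | c :: cs => String.mk (consAltGo k (c :: cs) c 0)

-- ===== PRECONDITION & SPEC =====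
-- Pre_cons excludes the empty string, on which both A and B raise IndexError (s[0]/dp[0]),
-- and k ≤ 0, on which A never terminates (k = 0 loops forever, k < 0 eventually raises IndexError).
def Pre_cons (s : String) (k : Int) : Prop := s.toList ≠ [] ∧ 1 ≤ k
instance (s : String) (k : Int) : Decidable (Pre_cons s k) := by unfold Pre_cons; infer_instance
def pvWitness_cons : String × Int := ("aaabbkaaa", 2)

def Spec_cons (s : String) (k : Int) (out : String) : Prop := out = cons_alt s k
instance (s : String) (k : Int) (out : String) : Decidable (Spec_cons s k out) := by unfold Spec_cons; infer_instance

-- ===== CLAIM (what is proved, stated in full; the proofs are below) =====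
def Claim_equal_cons : Prop := ∀ (s : String) (k : Int), Dom_cons s k → Pre_cons s k → Spec_cons s k (cons s k)

-- ===== LEMMAS AND PROOFS =====

-- runs decomposition: runsAux cs cur cnt = the runs of (cur^cnt ++ cs) merged on the left
def runsAux : List Char → Char → Int → List (Char × Int)
  | [], cur, cnt => [(cur, cnt)]
  | c :: cs, cur, cnt =>
    if c == cur then runsAux cs cur (cnt + 1)
    else (cur, cnt) :: runsAux cs c 1

def flatRuns (k : Int) (rs : List (Char × Int)) : List Char :=
  rs.flatMap (fun p => consAltRep p.1 (PySem.Int.mod p.2 k))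

def specL (k : Int) : List Char → List Char
  | [] => []
  | c :: rest => flatRuns k (runsAux rest c 1)

-- the dp values along a run: Ramp m d = [d+1, d+2, …, d+m]
def Ramp : Nat → Int → List Int
  | 0, _ => []
  | m + 1, d => (d + 1) :: Ramp m (d + 1)

lemma Ramp_getElem? : ∀ (m j : Nat) (d : Int), j < m → (Ramp m d)[j]? = some (d + j + 1) := by
  intro m; induction m with
  | zero => omega
  | succ m ih =>
    intro j d hj
    cases j with
    | zero => simp [Ramp]
    | succ j => simpa [Ramp, add_assoc, add_comm, add_left_comm] using ih j (d + 1) (by omega)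

lemma length_consDpAux : ∀ (cs : List Char) (p : Char) (d : Int), (consDpAux cs p d).length = cs.length := by
  intro cs; induction cs with
  | nil => intro p d; rfl
  | cons c cs ih => intro p d; simp [consDpAux, ih]

lemma length_consDp (cs : List Char) : (consDp cs).length = cs.length := by
  cases cs with
  | nil => rfl
  | cons c cs => simp [consDp, length_consDpAux]

lemma consDpAux_replicate : ∀ (m : Nat) (c : Char) (d : Int),
    consDpAux (List.replicate m c) c d = Ramp m d := by
  intro m; induction m with
  | zero => intro c d; rfl
  | succ m ih => intro c d; simp [List.replicate_succ, consDpAux, Ramp, ih]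

lemma consDpAux_append_run : ∀ (rest : List Char) (p : Char) (d : Int) (r : Nat) (c : Char),
    (p :: rest).getLast (by simp) ≠ c →
    consDpAux (rest ++ List.replicate (r + 1) c) p d = consDpAux rest p d ++ Ramp (r + 1) 0 := by
  intro rest; induction rest with
  | nil =>
    intro p d r c h
    simp only [List.getLast_singleton] at h
    have hpc : (p == c) = false := by simp [h]
    simp [List.replicate_succ, consDpAux, hpc, consDpAux_replicate, Ramp]
  | cons x rest ih =>
    intro p d r c h
    rw [List.getLast_cons (by simp)] at h
    simp only [List.cons_append, consDpAux]
    rw [ih x _ r c h]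

lemma consDp_append_run (t : List Char) (r : Nat) (c : Char) (h : t.getLast? ≠ some c) :
    consDp (t ++ List.replicate (r + 1) c) = consDp t ++ Ramp (r + 1) 0 := by
  cases t with
  | nil => simp [List.replicate_succ, consDp, consDpAux_replicate, Ramp]
  | cons p rest =>
    rw [List.getLast?_eq_some_getLast (by simp)] at h
    simp only [List.cons_append, consDp]
    rw [consDpAux_append_run rest p 1 r c (by simpa using h)]

-- the loop returns acc as soon as i < 0, whatever the fuel
lemma consLoop_neg (s : List Char) (dp : List Int) (k i : Int) (acc : List Char) (f : Nat)
    (hi : i < 0) : consLoop s dp k i acc f = acc := by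
  cases f with
  | zero => rfl
  | succ f => simp [consLoop, not_le.mpr hi]

-- fuel irrelevance: any fuel ≥ (i+1).toNat gives the same result (k ≥ 1)
lemma consLoop_fuel (s : List Char) (dp : List Int) (k : Int) (hk : 1 ≤ k) :
    ∀ (n : Nat) (i : Int), (i + 1).toNat ≤ n → ∀ (acc : List Char) (f1 f2 : Nat),
      (i + 1).toNat ≤ f1 → (i + 1).toNat ≤ f2 →
      consLoop s dp k i acc f1 = consLoop s dp k i acc f2 := by
  intro n
  induction n with
  | zero =>
    intro i hn acc f1 f2 h1 h2
    have hi : i < 0 := by omega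
    rw [consLoop_neg _ _ _ _ _ _ hi, consLoop_neg _ _ _ _ _ _ hi]
  | succ n ih =>
    intro i hn acc f1 f2 h1 h2
    by_cases hi : i < 0
    · rw [consLoop_neg _ _ _ _ _ _ hi, consLoop_neg _ _ _ _ _ _ hi]
    · push_neg at hi
      have h1' : (i + 1).toNat ≥ 1 := by omega
      obtain ⟨g1, rfl⟩ : ∃ g1, f1 = g1 + 1 := ⟨f1 - 1, by omega⟩
      obtain ⟨g2, rfl⟩ : ∃ g2, f2 = g2 + 1 := ⟨f2 - 1, by omega⟩
      simp only [consLoop, hi, if_pos]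
      split
      · exact ih (i - 1) (by omega) _ g1 g2 (by omega) (by omega)
      · exact ih (i - k) (by omega) _ g1 g2 (by omega) (by omega)

-- while the index stays left of t, the appended suffix and its dp are invisible
lemma consLoop_prefix (t u : List Char) (dpt du : List Int) (k : Int)
    (ht : dpt.length = t.length) (hk : 1 ≤ k) :
    ∀ (f : Nat) (i : Int), i < (t.length : Int) → ∀ (acc : List Char),
      consLoop (t ++ u) (dpt ++ du) k i acc f = consLoop t dpt k i acc f := by
  intro f
  induction f with
  | zero => intro i hi acc; rfl
  | succ f ih =>
    intro i hi acc
    by_cases h0 : 0 ≤ i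
    · have hdp : PySem.List.pyGet? (dpt ++ du) i = PySem.List.pyGet? dpt i := by
        rw [PySem.List.pyGet?_of_nonneg (dpt ++ du) h0, PySem.List.pyGet?_of_nonneg dpt h0]
        rw [List.getElem?_append_left (by omega)]
      have hs : PySem.List.pyGet? (t ++ u) i = PySem.List.pyGet? t i := by
        rw [PySem.List.pyGet?_of_nonneg (t ++ u) h0, PySem.List.pyGet?_of_nonneg t h0]
        rw [List.getElem?_append_left (by omega)]
      simp only [consLoop, h0, if_pos, hdp, hs]
      split
      · exact ih (i - 1) (by omega) _
      · exact ih (i - k) (by omega) _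
    · push_neg at h0
      rw [consLoop_neg _ _ _ _ _ _ h0, consLoop_neg _ _ _ _ _ _ h0]

-- consuming the last run: starting at its (j+1)-th char, the loop keeps (j+1) % k copies of c
-- and lands on the top of the prefix t
lemma consLoop_run (t : List Char) (r : Nat) (c : Char) (k : Int) (hk : 1 ≤ k) :
    ∀ (j : Nat), j ≤ r → ∀ (acc : List Char) (f : Nat), t.length + j + 1 ≤ f →
      consLoop (t ++ List.replicate (r + 1) c) (consDp t ++ Ramp (r + 1) 0) k
        ((t.length : Int) + j) acc f
      = consLoop (t ++ List.replicate (r + 1) c) (consDp t ++ Ramp (r + 1) 0) k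
        ((t.length : Int) - 1) (List.replicate ((j + 1) % k.toNat) c ++ acc) t.length := by
  intro j
  induction j using Nat.strong_induction_on with
  | _ j ih =>
    intro hj acc f hf
    obtain ⟨g, rfl⟩ : ∃ g, f = g + 1 := ⟨f - 1, by omega⟩
    have h0 : (0 : Int) ≤ (t.length : Int) + j := by positivity
    have hdp : PySem.List.pyGet? (consDp t ++ Ramp (r + 1) 0) ((t.length : Int) + j)
        = some ((j : Int) + 1) := by
      have := PySem.List.pyGet?_append_right (consDp t) (Ramp (r + 1) 0) j
      rw [length_consDp] at this
      rw [this, Ramp_getElem? (r + 1) j 0 (by omega)]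
      simp
    have hch : PySem.List.pyGet? (t ++ List.replicate (r + 1) c) ((t.length : Int) + j)
        = some c := by
      rw [PySem.List.pyGet?_append_right t (List.replicate (r + 1) c) j]
      simp [Nat.lt_succ_of_le hj]
    have hkn : k = (k.toNat : Int) := by omega
    simp only [consLoop, h0, if_pos, hdp, hch, Option.getD_some]
    by_cases hlt : (j : Int) + 1 < k
    · rw [if_pos hlt]
      cases j with
      | zero =>
        have : (t.length : Int) + (0 : Nat) - 1 = (t.length : Int) - 1 := by simp
        rw [this]
        have h1k : 1 % k.toNat = 1 := Nat.mod_eq_of_lt (by omega)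
        rw [h1k]
        simp only [List.replicate_one, List.singleton_append]
        exact consLoop_fuel _ _ _ hk (g) _ (by omega) _ _ _ (by omega) (by omega)
      | succ j' =>
        have hstep : (t.length : Int) + (j' + 1 : Nat) - 1 = (t.length : Int) + j' := by
          push_cast; ring
        have hj1 : (j' + 1 + 1) % k.toNat = j' + 1 + 1 := Nat.mod_eq_of_lt (by omega)
        have hj2 : (j' + 1) % k.toNat = j' + 1 := Nat.mod_eq_of_lt (by omega)
        have hacc : List.replicate ((j' + 1 + 1) % k.toNat) c ++ acc
            = List.replicate ((j' + 1) % k.toNat) c ++ (c :: acc) := by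
          rw [hj1, hj2, List.replicate_succ' (n := j' + 1), List.append_assoc]
          rfl
        rw [hstep, ih j' (by omega) (by omega) (c :: acc) g (by omega), hacc]
    · rw [if_neg hlt]
      push_neg at hlt
      by_cases hje : (j : Int) + 1 = k
      · have : (t.length : Int) + j - k = (t.length : Int) - 1 := by omega
        rw [this]
        have hmod : (j + 1) % k.toNat = 0 := by
          have : j + 1 = k.toNat := by omega
          simp [this]
        rw [hmod]
        simp only [List.replicate_zero, List.nil_append]
        exact consLoop_fuel _ _ _ hk (g) _ (by omega) _ _ _ (by omega) (by omega)
      · have hkj : k.toNat ≤ j := by omega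
        have : (t.length : Int) + j - k = (t.length : Int) + ((j - k.toNat : Nat) : Int) := by
          push_cast; omega
        have hmod : (j + 1) % k.toNat = (j - k.toNat + 1) % k.toNat := by
          rw [Nat.mod_eq_sub_mod (show k.toNat ≤ j + 1 by omega)]
          congr 1; omega
        rw [this, ih (j - k.toNat) (by omega) (by omega) acc g (by omega), hmod]

lemma runsAux_replicate : ∀ (n : Nat) (c : Char) (m : Int),
    runsAux (List.replicate n c) c m = [(c, m + n)] := by
  intro n; induction n with
  | zero => intro c m; simp [runsAux]
  | succ n ih => intro c m; simp [List.replicate_succ, runsAux, ih]; ring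

lemma runsAux_append_run : ∀ (rest : List Char) (p : Char) (m : Int) (r : Nat) (c : Char),
    (p :: rest).getLast (by simp) ≠ c →
    runsAux (rest ++ List.replicate (r + 1) c) p m
      = runsAux rest p m ++ [(c, ((r : Int) + 1))] := by
  intro rest; induction rest with
  | nil =>
    intro p m r c h
    simp only [List.getLast_singleton] at h
    have hpc : (c == p) = false := by simpa using Ne.symm h
    simp [List.replicate_succ, runsAux, hpc, runsAux_replicate]
    ring
  | cons x rest ih =>
    intro p m r c h
    rw [List.getLast_cons (by simp)] at h
    by_cases hxp : x = p
    · subst hxp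
      simp only [List.cons_append, runsAux, beq_self_eq_true, if_true]
      exact ih x (m + 1) r c h
    · have hb : (x == p) = false := by simpa using hxp
      simp only [List.cons_append, runsAux, hb, Bool.false_eq_true, if_false]
      rw [ih x 1 r c h]

lemma specL_append_run (k : Int) (t : List Char) (r : Nat) (c : Char) (hk : 1 ≤ k)
    (h : t.getLast? ≠ some c) :
    specL k (t ++ List.replicate (r + 1) c)
      = specL k t ++ List.replicate ((r + 1) % k.toNat) c := by
  have hmod : consAltRep c (PySem.Int.mod ((r : Int) + 1) k)
      = List.replicate ((r + 1) % k.toNat) c := by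
    have hkn : k = (k.toNat : Int) := by omega
    have h1 : PySem.Int.mod ((r : Int) + 1) k = (((r + 1) % k.toNat : Nat) : Int) := by
      rw [hkn]; exact_mod_cast PySem.Int.mod_natCast (r + 1) k.toNat
    rw [h1]
    simp only [consAltRep, Int.toNat_natCast]
  cases t with
  | nil =>
    simp only [List.nil_append, List.replicate_succ, specL, runsAux_replicate, flatRuns,
      List.flatMap_cons, List.flatMap_nil, List.append_nil]
    rw [show (1 : Int) + (r : Int) = (r : Int) + 1 by ring, hmod]
  | cons p rest =>
    rw [List.getLast?_eq_some_getLast (by simp)] at h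
    simp only [List.cons_append, specL]
    rw [runsAux_append_run rest p 1 r c (by simpa using h)]
    simp [flatRuns, hmod]

lemma head?_dropWhile (p : Char → Bool) : ∀ (l : List Char) (x : Char),
    (l.dropWhile p).head? = some x → p x = false := by
  intro l; induction l with
  | nil => intro x h; simp at h
  | cons a l ih =>
    intro x h
    by_cases hp : p a
    · exact ih x (by simpa [List.dropWhile_cons, hp] using h)
    · simp [hp] at h
      simp [← h, hp]

lemma exists_last_run : ∀ (cs : List Char), cs ≠ [] →
    ∃ t r c, cs = t ++ List.replicate (r + 1) c ∧ t.getLast? ≠ some c := by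
  intro cs hcs
  have hrev : cs.reverse ≠ [] := by simpa using hcs
  obtain ⟨c, rest, hr⟩ := List.exists_cons_of_ne_nil hrev
  refine ⟨(rest.dropWhile (· == c)).reverse, (rest.takeWhile (· == c)).length, c, ?_, ?_⟩
  · have htake : rest.takeWhile (· == c)
        = List.replicate (rest.takeWhile (· == c)).length c :=
      List.eq_replicate_of_mem (fun b hb => by simpa using List.mem_takeWhile_imp hb)
    have h1 : rest.reverse
        = (rest.dropWhile (· == c)).reverse ++ (rest.takeWhile (· == c)).reverse := by
      rw [← List.reverse_append, List.takeWhile_append_dropWhile]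
    have h2 : cs = rest.reverse ++ [c] := by
      rw [← List.reverse_reverse cs, hr, List.reverse_cons]
    have htakerev : (rest.takeWhile (· == c)).reverse
        = List.replicate (rest.takeWhile (· == c)).length c := by
      conv_lhs => rw [htake]
      exact List.reverse_replicate
    rw [h2, h1, htakerev, List.append_assoc, ← List.replicate_succ']
  · rw [List.getLast?_reverse]
    intro h
    have := head?_dropWhile (· == c) rest c h
    simp at this

lemma consLoop_main (k : Int) (hk : 1 ≤ k) :
    ∀ (n : Nat) (cs : List Char), cs.length ≤ n → ∀ (acc : List Char) (f : Nat), cs.length ≤ f →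
      consLoop cs (consDp cs) k ((cs.length : Int) - 1) acc f = specL k cs ++ acc := by
  intro n
  induction n with
  | zero =>
    intro cs hn acc f hf
    have : cs = [] := List.length_eq_zero_iff.mp (by omega)
    subst this
    rw [consLoop_neg _ _ _ _ _ _ (by norm_num)]; rfl
  | succ n ih =>
    intro cs hn acc f hf
    by_cases hcs : cs = []
    · subst hcs; rw [consLoop_neg _ _ _ _ _ _ (by norm_num)]; rfl
    · obtain ⟨t, r, c, rfl, hlast⟩ := exists_last_run cs hcs
      have hlen : (t ++ List.replicate (r + 1) c).length = t.length + (r + 1) := by simp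
      have hidx : ((t ++ List.replicate (r + 1) c).length : Int) - 1 = (t.length : Int) + r := by
        rw [hlen]; push_cast; ring
      rw [hidx, consDp_append_run t r c hlast,
        consLoop_run t r c k hk r (le_refl r) acc f (by omega),
        consLoop_prefix t (List.replicate (r + 1) c) (consDp t) (Ramp (r + 1) 0) k
          (length_consDp t) hk t.length ((t.length : Int) - 1) (by omega),
        ih t (by simp at hn; omega) _ t.length (le_refl _),
        specL_append_run k t r c hk hlast]
      simp

lemma consAltGo_eq (k : Int) : ∀ (cs : List Char) (cur : Char) (cnt : Int),
    consAltGo k cs cur cnt = flatRuns k (runsAux cs cur cnt) := by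
  intro cs; induction cs with
  | nil => intro cur cnt; simp [consAltGo, runsAux, flatRuns]
  | cons c cs ih =>
    intro cur cnt
    simp only [consAltGo, runsAux]
    split
    · exact ih cur (cnt + 1)
    · rw [ih c 1]; simp [flatRuns]

lemma cons_alt_eq_specL (s : String) (k : Int) (h : s.toList ≠ []) :
    cons_alt s k = String.mk (specL k s.toList) := by
  unfold cons_alt
  cases hs : s.toList with
  | nil => exact absurd hs h
  | cons c rest =>
    show String.mk (consAltGo k (c :: rest) c 0) = String.mk (specL k (c :: rest))
    rw [consAltGo_eq]
    simp [runsAux, specL]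

-- ===== VERDICT (by name: the statement is the Claim_ definition above) =====
theorem cons_spec : Claim_equal_cons := by
  intro s k _ hpre
  obtain ⟨hne, hk⟩ := hpre
  unfold Spec_cons
  rw [cons_alt_eq_specL s k hne]
  unfold cons
  cases hs : s.toList with
  | nil => exact absurd hs hne
  | cons c rest =>
    show String.mk (consLoop (c :: rest) (consDp (c :: rest)) k
        (((c :: rest).length : Int) - 1) [] (c :: rest).length) = String.mk (specL k (c :: rest))
    rw [consLoop_main k hk (c :: rest).length (c :: rest) (le_refl _) [] _ (le_refl _)]
    simp
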